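-- pv_equiv track=rewrite | github.com/iz05/ai | regex_compiler/dfa_red_v2.py | reachable_from
-- ===== SOURCE A (Python) =====
-- def reachable_from(node, dfa, nodes, alphabet):
--     if node in nodes:
--         return nodes
--     nodes.add(node)
--     for char in alphabet:
--         if char in dfa[node]:
--             for r in reachable_from(dfa[node][char], dfa, nodes, alphabet):
--                 nodes.add(r)
--     return nodes
-- ===== SOURCE B (Python) =====
-- def reachable_from(node, dfa, nodes, alphabet):
--     # Iterative DFS with an explicit stack; mutates `nodes` in place and
--     # returns it, exactly like the recursive original.
--     if node in nodes:
--         return nodes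
--     stack = [node]
--     while stack:
--         n = stack.pop()
--         if n in nodes:
--             continue
--         nodes.add(n)
--         for char in reversed(alphabet):
--             if char in dfa[n]:
--                 stack.append(dfa[n][char])
--     return nodes
-- ===== Notes on version B (the rewrite author's own statement) =====
-- stated objective: alternative
-- what changed: The recursive DFS (one Python call frame per state, plus a redundant re-add loop over each recursive result) is replaced by an iterative worklist traversal with an explicit stack, which visits the same states without recursion and drops the no-op re-add loop; Pre_ excludes exactly the inputs on which A raises KeyError (some state reachable from node outside nodes has no dfa row while the alphabet is nonempty), and B raises KeyError on exactly those inputs too.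
import Mathlib
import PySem

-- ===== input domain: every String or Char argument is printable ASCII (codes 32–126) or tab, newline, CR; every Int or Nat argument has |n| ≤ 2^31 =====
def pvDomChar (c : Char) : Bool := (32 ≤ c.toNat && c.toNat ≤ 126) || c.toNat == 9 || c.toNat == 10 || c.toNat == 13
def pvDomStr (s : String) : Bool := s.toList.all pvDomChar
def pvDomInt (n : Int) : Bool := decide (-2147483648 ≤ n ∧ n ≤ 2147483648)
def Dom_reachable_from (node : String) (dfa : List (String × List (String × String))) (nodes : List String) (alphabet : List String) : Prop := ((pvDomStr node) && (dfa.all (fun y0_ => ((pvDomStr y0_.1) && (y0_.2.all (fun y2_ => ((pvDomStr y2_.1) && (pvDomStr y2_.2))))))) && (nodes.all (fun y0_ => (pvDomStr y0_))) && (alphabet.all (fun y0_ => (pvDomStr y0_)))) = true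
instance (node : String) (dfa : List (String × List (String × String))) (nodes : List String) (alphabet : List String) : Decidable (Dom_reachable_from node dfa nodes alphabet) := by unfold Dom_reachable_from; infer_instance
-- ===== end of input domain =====

-- B replaces A's recursive DFS by an iterative explicit-stack traversal (same return value;
-- both mutate the Python `nodes` set in place to exactly the returned set).

-- ===== PORT A =====
-- A's recursion, with a fuel guard that only makes the recursion total (the fuel used by
-- `reachable_from` below is proved sufficient on Pre_ inputs by the lemmas at the bottom).
mutual
def pvGoA (dfa : List (String × List (String × String))) (alphabet : List String) (f : Nat) (node : String) (nodes : List String) : List String :=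
  match f with
  | 0 => nodes
  | f + 1 =>
    if node ∈ nodes then nodes
    else pvGoAChars dfa alphabet f node alphabet (PySem.Set.add nodes node)
termination_by (f, 0)

def pvGoAChars (dfa : List (String × List (String × String))) (alphabet : List String) (f : Nat) (node : String) (cs : List String) (ns : List String) : List String :=
  match cs with
  | [] => ns
  | c :: cs =>
    match (PySem.Dict.mk dfa).get? node with
    | none => pvGoAChars dfa alphabet f node cs ns   -- Python raises KeyError at `char in dfa[node]`; Pre_ excludes this
    | some row =>
      match (PySem.Dict.mk row).get? c with
      | none => pvGoAChars dfa alphabet f node cs ns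
      | some tgt =>
        let res := pvGoA dfa alphabet f tgt ns
        pvGoAChars dfa alphabet f node cs (res.foldl PySem.Set.add res)  -- `for r in …: nodes.add(r)`
termination_by (f, cs.length + 1)
end

def reachable_from (node : String) (dfa : List (String × List (String × String))) (nodes : List String) (alphabet : List String) : List String :=
  pvGoA dfa alphabet (dfa.length + 2) node nodes

-- ===== PORT B =====
-- B's while-loop over an explicit stack (head of the list = top of the stack); fuel guard
-- again only makes the loop total, proved sufficient on Pre_ inputs below.
def pvGoB (dfa : List (String × List (String × String))) (alphabet : List String) (f : Nat) (stack : List String) (nodes : List String) : List String :=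
  match f, stack with
  | 0, _ => nodes
  | _ + 1, [] => nodes
  | f + 1, n :: rest =>
    if n ∈ nodes then pvGoB dfa alphabet f rest nodes
    else
      match (PySem.Dict.mk dfa).get? n with
      | none => pvGoB dfa alphabet f rest (PySem.Set.add nodes n)  -- Python raises KeyError at `dfa[n]` when alphabet ≠ []; Pre_ excludes that; with alphabet = [] nothing is pushed, as here
      | some row =>
        pvGoB dfa alphabet f
          (alphabet.reverse.foldl
            (fun st c =>
              match (PySem.Dict.mk row).get? c with
              | some t => t :: st
              | none => st) rest)
          (PySem.Set.add nodes n)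

def reachable_from_alt (node : String) (dfa : List (String × List (String × String))) (nodes : List String) (alphabet : List String) : List String :=
  if node ∈ nodes then nodes
  else pvGoB dfa alphabet (dfa.length * (alphabet.length + 1) + 2) [node] nodes

-- ===== PRECONDITION & SPEC =====
-- Reachability of the input graph (used only by Pre_, not by the ports): pvChildren a = the
-- alphabet-successors of state a; pvClosure = the states reachable from `node` through states
-- outside `nodes`, computed by saturating the one-step successor operator (the iteration count
-- pvUniverse.length is an upper bound on the number of distinct states that can ever appear).
def pvChildren (dfa : List (String × List (String × String))) (alphabet : List String) (a : String) : List String :=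
  match (PySem.Dict.mk dfa).get? a with
  | none => []
  | some row => alphabet.filterMap (fun c => (PySem.Dict.mk row).get? c)

def pvStep (dfa : List (String × List (String × String))) (nodes alphabet : List String) (S : List String) : List String :=
  S.foldl (fun acc a => if a ∈ nodes then acc else (pvChildren dfa alphabet a).foldl PySem.Set.add acc) S

def pvUniverse (node : String) (dfa : List (String × List (String × String))) (nodes : List String) : List String :=
  node :: (nodes ++ dfa.map Prod.fst ++ dfa.flatMap (fun p => p.2.map Prod.snd))

def pvClosure (node : String) (dfa : List (String × List (String × String))) (nodes alphabet : List String) : List String :=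
  (pvStep dfa nodes alphabet)^[(pvUniverse node dfa nodes).length] [node]

-- Pre_ excludes EXACTLY the inputs on which Python A raises KeyError: with a nonempty alphabet,
-- some state reachable from `node` through states outside `nodes` has no row in dfa (A looks up
-- `dfa[n]` for every such state); B raises KeyError on exactly the same inputs.
def Pre_reachable_from (node : String) (dfa : List (String × List (String × String))) (nodes : List String) (alphabet : List String) : Prop :=
  node ∈ nodes ∨ alphabet = [] ∨
    ∀ m ∈ pvClosure node dfa nodes alphabet, m ∈ nodes ∨ m ∈ dfa.map Prod.fst

instance (node : String) (dfa : List (String × List (String × String))) (nodes : List String) (alphabet : List String) : Decidable (Pre_reachable_from node dfa nodes alphabet) := by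
  unfold Pre_reachable_from; infer_instance

def pvWitness_reachable_from : String × (List (String × List (String × String))) × List String × List String :=
  ("a", [("a", [("x", "b")]), ("b", [])], [], ["x"])

def Spec_reachable_from (node : String) (dfa : List (String × List (String × String))) (nodes : List String) (alphabet : List String) (out : List String) : Prop := out = reachable_from_alt node dfa nodes alphabet
instance (node : String) (dfa : List (String × List (String × String))) (nodes : List String) (alphabet : List String) (out : List String) : Decidable (Spec_reachable_from node dfa nodes alphabet out) := by unfold Spec_reachable_from; infer_instance

-- ===== CLAIM (what is proved, stated in full; the proofs are below) =====
def Claim_equal_reachable_from : Prop := ∀ (node : String) (dfa : List (String × List (String × String))) (nodes : List String) (alphabet : List String), Dom_reachable_from node dfa nodes alphabet → Pre_reachable_from node dfa nodes alphabet → Spec_reachable_from node dfa nodes alphabet (reachable_from node dfa nodes alphabet)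

-- ===== LEMMAS AND PROOFS =====

-- the keys of dfa, and the "unvisited keys" measure every expansion decreases
def pvKeys (dfa : List (String × List (String × String))) : List String := dfa.map Prod.fst
def pvMu (dfa : List (String × List (String × String))) (ns : List String) : Nat :=
  (pvKeys dfa).countP (fun k => decide (k ∉ ns))

theorem pv_subset_add (ns : List String) (x : String) : ns ⊆ PySem.Set.add ns x := by
  intro y hy; exact (PySem.Set.mem_add ns x y).mpr (Or.inl hy)

theorem pv_add_of_mem {ns : List String} {x : String} (h : x ∈ ns) : PySem.Set.add ns x = ns := by
  simp [PySem.Set.add, PySem.Set.contains, h]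

theorem pv_foldl_add_of_subset : ∀ (l s : List String), (∀ x ∈ l, x ∈ s) → l.foldl PySem.Set.add s = s := by
  intro l; induction l with
  | nil => intro s _; rfl
  | cons a l ih =>
    intro s h
    simp only [List.foldl_cons, pv_add_of_mem (h a (by simp))]
    exact ih s (fun x hx => h x (by simp [hx]))

theorem pv_mem_foldl_add : ∀ (l acc : List String) (x : String), x ∈ l.foldl PySem.Set.add acc ↔ x ∈ acc ∨ x ∈ l := by
  intro l
  induction l with
  | nil => simp
  | cons a l ih =>
    intro acc x
    simp only [List.foldl_cons, ih, PySem.Set.mem_add, List.mem_cons]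
    tauto

theorem pvGoAChars_subset (dfa : List (String × List (String × String))) (alphabet : List String) (f : Nat)
    (hA : ∀ node ns, ns ⊆ pvGoA dfa alphabet f node ns) :
    ∀ cs node ns, ns ⊆ pvGoAChars dfa alphabet f node cs ns := by
  intro cs
  induction cs with
  | nil => intro node ns; simp [pvGoAChars]
  | cons c cs ih =>
    intro node ns
    simp only [pvGoAChars]
    cases hd : (PySem.Dict.mk dfa).get? node with
    | none => exact ih node ns
    | some row =>
      dsimp only
      cases hr : (PySem.Dict.mk row).get? c with
      | none => exact ih node ns
      | some tgt =>
        dsimp only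
        rw [pv_foldl_add_of_subset _ _ (fun x hx => hx)]
        exact fun x hx => ih node _ (hA tgt ns hx)

theorem pvGoA_subset (dfa : List (String × List (String × String))) (alphabet : List String) :
    ∀ (f : Nat) (node : String) (ns : List String), ns ⊆ pvGoA dfa alphabet f node ns := by
  intro f
  induction f with
  | zero => intro node ns; simp [pvGoA]
  | succ f ih =>
    intro node ns
    simp only [pvGoA]
    split
    · exact fun x hx => hx
    · exact fun x hx => pvGoAChars_subset dfa alphabet f ih alphabet node _ (pv_subset_add ns node hx)

theorem pvMu_mono {dfa : List (String × List (String × String))} {ns ns' : List String} (h : ns ⊆ ns') :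
    pvMu dfa ns' ≤ pvMu dfa ns := by
  apply List.countP_mono_left
  intro k _ hk
  simp only [decide_eq_true_eq] at hk ⊢
  exact fun hmem => hk (h hmem)

theorem pv_countP_lt (ns : List String) (node : String) (hnot : node ∉ ns) :
    ∀ K : List String, node ∈ K →
      K.countP (fun k => decide (k ∉ ns ++ [node])) < K.countP (fun k => decide (k ∉ ns)) := by
  intro K
  induction K with
  | nil => simp
  | cons a K ih =>
    intro ha
    have hmono : K.countP (fun k => decide (k ∉ ns ++ [node])) ≤ K.countP (fun k => decide (k ∉ ns)) := by
      apply List.countP_mono_left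
      intro x _ hx
      simp only [decide_eq_true_eq, List.mem_append, List.mem_singleton] at hx ⊢
      exact fun h => hx (Or.inl h)
    simp only [List.countP_cons]
    rcases List.mem_cons.mp ha with h | h
    · subst h
      have h1 : (decide (node ∉ ns ++ [node])) = false := by simp
      have h2 : (decide (node ∉ ns)) = true := by simpa using hnot
      rw [h1, h2]
      simp only [Bool.false_eq_true, if_false, if_true]
      omega
    · have := ih h
      cases hb : (decide (a ∉ ns ++ [node]) : Bool) <;> cases hb2 : (decide (a ∉ ns) : Bool) <;>
        simp_all

theorem pvMu_add_lt {dfa : List (String × List (String × String))} {ns : List String} {node : String}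
    (hkey : node ∈ pvKeys dfa) (hnot : node ∉ ns) :
    pvMu dfa (PySem.Set.add ns node) < pvMu dfa ns := by
  have hadd : PySem.Set.add ns node = ns ++ [node] := by
    simp [PySem.Set.add, PySem.Set.contains, hnot]
  rw [pvMu, pvMu, hadd]
  exact pv_countP_lt ns node hnot _ hkey

theorem pvMu_le_len (dfa : List (String × List (String × String))) (ns : List String) :
    pvMu dfa ns ≤ dfa.length := by
  calc pvMu dfa ns ≤ (pvKeys dfa).length := List.countP_le_length
  _ = dfa.length := by simp [pvKeys]

theorem pv_keys_mk (dfa : List (String × List (String × String))) :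
    (PySem.Dict.mk dfa).keys = dfa.map Prod.fst := by
  simp [PySem.Dict.keys]

-- pvGoAChars with the row fixed is a fold of pvGoA over the children of the row
theorem pvGoAChars_eq_fold (dfa : List (String × List (String × String))) (alphabet : List String)
    (f : Nat) (node : String) (row : List (String × String))
    (hrow : (PySem.Dict.mk dfa).get? node = some row) :
    ∀ (cs ns : List String),
      pvGoAChars dfa alphabet f node cs ns =
        (cs.filterMap (fun c => (PySem.Dict.mk row).get? c)).foldl
          (fun s t => pvGoA dfa alphabet f t s) ns := by
  intro cs
  induction cs with
  | nil => intro ns; simp [pvGoAChars]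
  | cons c cs ih =>
    intro ns
    simp only [pvGoAChars, hrow, List.filterMap_cons]
    cases hr : (PySem.Dict.mk row).get? c with
    | none => exact ih ns
    | some tgt =>
      dsimp only
      rw [pv_foldl_add_of_subset _ _ (fun x hx => hx), List.foldl_cons]
      exact ih _

-- the children pushed by B (alphabet traversed in reverse, consing) are exactly A's children list
theorem pv_push_eq (row : List (String × String)) :
    ∀ (alphabet rest : List String),
      alphabet.reverse.foldl
        (fun st c =>
          match (PySem.Dict.mk row).get? c with
          | some t => t :: st
          | none => st) rest =
      alphabet.filterMap (fun c => (PySem.Dict.mk row).get? c) ++ rest := by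
  intro alphabet rest
  rw [List.foldl_reverse]
  induction alphabet with
  | nil => simp
  | cons a l ih =>
    simp only [List.foldr_cons, List.filterMap_cons, ih]
    cases h : (PySem.Dict.mk row).get? a <;> simp

theorem pv_get?_of_key {dfa : List (String × List (String × String))} {node : String}
    (h : node ∈ pvKeys dfa) : ∃ row, (PySem.Dict.mk dfa).get? node = some row := by
  cases hd : (PySem.Dict.mk dfa).get? node with
  | none =>
    exact absurd (by simpa [pv_keys_mk, pvKeys] using (PySem.Dict.get?_eq_none_iff_not_mem_keys _ _).mp hd)
      (by simpa [pvKeys] using h)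
  | some row => exact ⟨row, rfl⟩

theorem pvGoA_succ (dfa : List (String × List (String × String))) (alphabet : List String)
    (f : Nat) (node : String) (ns : List String) :
    pvGoA dfa alphabet (f + 1) node ns =
      if node ∈ ns then ns else pvGoAChars dfa alphabet f node alphabet (PySem.Set.add ns node) := by
  rw [pvGoA]

theorem pvGoB_nil (dfa : List (String × List (String × String))) (alphabet : List String)
    (f : Nat) (ns : List String) : pvGoB dfa alphabet f [] ns = ns := by
  cases f <;> rw [pvGoB]

theorem pvGoB_succ_cons (dfa : List (String × List (String × String))) (alphabet : List String)
    (f : Nat) (n : String) (rest ns : List String) :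
    pvGoB dfa alphabet (f + 1) (n :: rest) ns =
      if n ∈ ns then pvGoB dfa alphabet f rest ns
      else
        match (PySem.Dict.mk dfa).get? n with
        | none => pvGoB dfa alphabet f rest (PySem.Set.add ns n)
        | some row =>
          pvGoB dfa alphabet f
            (alphabet.reverse.foldl
              (fun st c =>
                match (PySem.Dict.mk row).get? c with
                | some t => t :: st
                | none => st) rest)
            (PySem.Set.add ns n) := by
  rw [pvGoB]

-- ===== closure facts =====

theorem pv_mem_step_aux (dfa : List (String × List (String × String))) (nodes alphabet : List String) :
    ∀ (l acc : List String) (x : String),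
      x ∈ l.foldl (fun acc a => if a ∈ nodes then acc else (pvChildren dfa alphabet a).foldl PySem.Set.add acc) acc ↔
        x ∈ acc ∨ ∃ a ∈ l, a ∉ nodes ∧ x ∈ pvChildren dfa alphabet a := by
  intro l
  induction l with
  | nil => simp
  | cons a l ih =>
    intro acc x
    simp only [List.foldl_cons]
    by_cases ha : a ∈ nodes
    · rw [if_pos ha, ih]
      simp only [List.mem_cons]
      constructor
      · rintro (h | ⟨b, hb, h1, h2⟩)
        · exact Or.inl h
        · exact Or.inr ⟨b, Or.inr hb, h1, h2⟩
      · rintro (h | ⟨b, (rfl | hb), h1, h2⟩)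
        · exact Or.inl h
        · exact absurd ha h1
        · exact Or.inr ⟨b, hb, h1, h2⟩
    · rw [if_neg ha, ih]
      simp only [pv_mem_foldl_add, List.mem_cons]
      constructor
      · rintro ((h | h) | ⟨b, hb, h1, h2⟩)
        · exact Or.inl h
        · exact Or.inr ⟨a, Or.inl rfl, ha, h⟩
        · exact Or.inr ⟨b, Or.inr hb, h1, h2⟩
      · rintro (h | ⟨b, (rfl | hb), h1, h2⟩)
        · exact Or.inl (Or.inl h)
        · exact Or.inl (Or.inr h2)
        · exact Or.inr ⟨b, hb, h1, h2⟩

theorem pv_mem_step (dfa : List (String × List (String × String))) (nodes alphabet : List String)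
    (S : List String) (x : String) :
    x ∈ pvStep dfa nodes alphabet S ↔ x ∈ S ∨ ∃ a ∈ S, a ∉ nodes ∧ x ∈ pvChildren dfa alphabet a :=
  pv_mem_step_aux dfa nodes alphabet S S x

theorem pv_step_supset (dfa : List (String × List (String × String))) (nodes alphabet : List String)
    (S : List String) : S ⊆ pvStep dfa nodes alphabet S := by
  intro x hx; exact (pv_mem_step dfa nodes alphabet S x).mpr (Or.inl hx)

theorem pv_step_mono (dfa : List (String × List (String × String))) (nodes alphabet : List String)
    {S T : List String} (h : ∀ x ∈ S, x ∈ T) :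
    ∀ x ∈ pvStep dfa nodes alphabet S, x ∈ pvStep dfa nodes alphabet T := by
  intro x hx
  rcases (pv_mem_step dfa nodes alphabet S x).mp hx with h1 | ⟨a, ha, h1, h2⟩
  · exact (pv_mem_step dfa nodes alphabet T x).mpr (Or.inl (h _ h1))
  · exact (pv_mem_step dfa nodes alphabet T x).mpr (Or.inr ⟨a, h a ha, h1, h2⟩)

theorem pv_children_univ {node : String} {dfa : List (String × List (String × String))}
    {nodes alphabet : List String} {a x : String} (hx : x ∈ pvChildren dfa alphabet a) :
    x ∈ pvUniverse node dfa nodes := by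
  unfold pvChildren at hx
  cases hd : (PySem.Dict.mk dfa).get? a with
  | none => rw [hd] at hx; simp at hx
  | some row =>
    rw [hd] at hx
    rcases List.mem_filterMap.mp hx with ⟨c, _, hget⟩
    have hct : (c, x) ∈ row := PySem.Dict.mem_items_of_get?_eq_some _ hget
    have har : (a, row) ∈ dfa := PySem.Dict.mem_items_of_get?_eq_some _ hd
    have : x ∈ dfa.flatMap (fun p => p.2.map Prod.snd) :=
      List.mem_flatMap.mpr ⟨(a, row), har, List.mem_map.mpr ⟨(c, x), hct, rfl⟩⟩
    simp [pvUniverse, this]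

theorem pv_iter_univ (node : String) (dfa : List (String × List (String × String)))
    (nodes alphabet : List String) :
    ∀ i, ∀ x ∈ (pvStep dfa nodes alphabet)^[i] [node], x ∈ pvUniverse node dfa nodes := by
  intro i
  induction i with
  | zero =>
    intro x hx
    simp only [Function.iterate_zero, id, List.mem_singleton] at hx
    subst hx; simp [pvUniverse]
  | succ i ih =>
    intro x hx
    rw [Function.iterate_succ_apply'] at hx
    rcases (pv_mem_step dfa nodes alphabet _ x).mp hx with h1 | ⟨a, _, _, h2⟩
    · exact ih x h1
    · exact pv_children_univ h2

theorem pv_iter_supset (dfa : List (String × List (String × String))) (nodes alphabet S0 : List String) :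
    ∀ i, (pvStep dfa nodes alphabet)^[i] S0 ⊆ (pvStep dfa nodes alphabet)^[i + 1] S0 := by
  intro i
  rw [Function.iterate_succ_apply']
  exact pv_step_supset dfa nodes alphabet _

theorem pv_stab_persist (dfa : List (String × List (String × String))) (nodes alphabet S0 : List String)
    (i : Nat) (h : ∀ x ∈ (pvStep dfa nodes alphabet)^[i + 1] S0, x ∈ (pvStep dfa nodes alphabet)^[i] S0) :
    ∀ d, ∀ x ∈ (pvStep dfa nodes alphabet)^[i + d + 1] S0, x ∈ (pvStep dfa nodes alphabet)^[i + d] S0 := by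
  intro d
  induction d with
  | zero => exact h
  | succ d ih =>
    show ∀ x ∈ (pvStep dfa nodes alphabet)^[(i + d + 1) + 1] S0, x ∈ (pvStep dfa nodes alphabet)^[(i + d) + 1] S0
    intro x hx
    rw [Function.iterate_succ_apply'] at hx
    rw [Function.iterate_succ_apply']
    exact pv_step_mono dfa nodes alphabet ih x hx

theorem pv_card_grow (dfa : List (String × List (String × String))) (nodes alphabet : List String)
    (node : String) (N : Nat)
    (h : ∀ i < N, ∃ x ∈ (pvStep dfa nodes alphabet)^[i + 1] [node], x ∉ (pvStep dfa nodes alphabet)^[i] [node]) :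
    ∀ i ≤ N, i + 1 ≤ ((pvStep dfa nodes alphabet)^[i] [node]).toFinset.card := by
  intro i
  induction i with
  | zero => intro _; simp
  | succ i ih =>
    intro hiN
    have hprev := ih (by omega)
    obtain ⟨x, hx1, hx2⟩ := h i (by omega)
    have hsub : ((pvStep dfa nodes alphabet)^[i] [node]).toFinset ⊂ ((pvStep dfa nodes alphabet)^[i + 1] [node]).toFinset := by
      constructor
      · intro y hy
        rw [List.mem_toFinset] at hy ⊢
        exact pv_iter_supset dfa nodes alphabet [node] i hy
      · intro hcon
        exact hx2 (List.mem_toFinset.mp (hcon (List.mem_toFinset.mpr hx1)))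
    have := Finset.card_lt_card hsub
    omega

theorem pv_closure_closed (node : String) (dfa : List (String × List (String × String)))
    (nodes alphabet : List String) :
    ∀ x ∈ pvStep dfa nodes alphabet (pvClosure node dfa nodes alphabet),
      x ∈ pvClosure node dfa nodes alphabet := by
  by_cases hstab : ∃ i < (pvUniverse node dfa nodes).length,
      ∀ x ∈ (pvStep dfa nodes alphabet)^[i + 1] [node], x ∈ (pvStep dfa nodes alphabet)^[i] [node]
  · obtain ⟨i, hiN, hi⟩ := hstab
    have hd := pv_stab_persist dfa nodes alphabet [node] i hi ((pvUniverse node dfa nodes).length - i)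
    have e : i + ((pvUniverse node dfa nodes).length - i) = (pvUniverse node dfa nodes).length := by omega
    rw [e] at hd
    intro x hx
    apply hd
    rw [Function.iterate_succ_apply']
    exact hx
  · exfalso
    push Not at hstab
    have hgrow := pv_card_grow dfa nodes alphabet node (pvUniverse node dfa nodes).length hstab
      (pvUniverse node dfa nodes).length le_rfl
    have hsub : ((pvStep dfa nodes alphabet)^[(pvUniverse node dfa nodes).length] [node]).toFinset ⊆
        (pvUniverse node dfa nodes).toFinset := by
      intro y hy
      rw [List.mem_toFinset] at hy ⊢
      exact pv_iter_univ node dfa nodes alphabet _ y hy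
    have h1 := Finset.card_le_card hsub
    have h2 := List.toFinset_card_le (pvUniverse node dfa nodes)
    omega

theorem pv_closure_self (node : String) (dfa : List (String × List (String × String)))
    (nodes alphabet : List String) : node ∈ pvClosure node dfa nodes alphabet := by
  unfold pvClosure
  induction (pvUniverse node dfa nodes).length with
  | zero => simp
  | succ i ih => exact pv_iter_supset dfa nodes alphabet [node] i ih

theorem pv_closure_children {node : String} {dfa : List (String × List (String × String))}
    {nodes alphabet : List String} {a : String}
    (ha : a ∈ pvClosure node dfa nodes alphabet) (hnn : a ∉ nodes) :
    ∀ t ∈ pvChildren dfa alphabet a, t ∈ pvClosure node dfa nodes alphabet := by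
  intro t ht
  apply pv_closure_closed
  exact (pv_mem_step dfa nodes alphabet _ t).mpr (Or.inr ⟨a, ha, hnn, ht⟩)

-- ===== the run stays inside nodes0 ∪ C =====

theorem pv_fold_ok (dfa : List (String × List (String × String))) (alphabet nodes0 C : List String) (f : Nat)
    (ihA : ∀ node ns, node ∈ C → nodes0 ⊆ ns → (∀ x ∈ ns, x ∈ nodes0 ∨ x ∈ C) →
      ∀ x ∈ pvGoA dfa alphabet f node ns, x ∈ nodes0 ∨ x ∈ C) :
    ∀ (L s : List String), (∀ t ∈ L, t ∈ C) → nodes0 ⊆ s → (∀ x ∈ s, x ∈ nodes0 ∨ x ∈ C) →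
      ∀ x ∈ L.foldl (fun s t => pvGoA dfa alphabet f t s) s, x ∈ nodes0 ∨ x ∈ C := by
  intro L
  induction L with
  | nil => intro s _ _ hs x hx; exact hs x hx
  | cons t L ihL =>
    intro s hL hsub hs x hx
    rw [List.foldl_cons] at hx
    have hs' := ihA t s (hL t (by simp)) hsub hs
    have hsub' : nodes0 ⊆ pvGoA dfa alphabet f t s :=
      fun y hy => pvGoA_subset dfa alphabet f t s (hsub hy)
    exact ihL _ (fun u hu => hL u (by simp [hu])) hsub' hs' x hx

theorem pvGoA_ok (dfa : List (String × List (String × String))) (alphabet nodes0 C : List String)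
    (hclosed : ∀ a ∈ C, a ∉ nodes0 → ∀ t ∈ pvChildren dfa alphabet a, t ∈ C)
    (hkeys : ∀ a ∈ C, a ∉ nodes0 → a ∈ pvKeys dfa) :
    ∀ (f : Nat) (node : String) (ns : List String), node ∈ C → nodes0 ⊆ ns →
      (∀ x ∈ ns, x ∈ nodes0 ∨ x ∈ C) →
      ∀ x ∈ pvGoA dfa alphabet f node ns, x ∈ nodes0 ∨ x ∈ C := by
  intro f
  induction f with
  | zero => intro node ns _ _ hns x hx; simp only [pvGoA] at hx; exact hns x hx
  | succ f ih =>
    intro node ns hC hsub hns x hx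
    rw [pvGoA_succ] at hx
    by_cases hn : node ∈ ns
    · rw [if_pos hn] at hx; exact hns x hx
    · rw [if_neg hn] at hx
      have hn0 : node ∉ nodes0 := fun h => hn (hsub h)
      obtain ⟨row, hd⟩ := pv_get?_of_key (hkeys node hC hn0)
      rw [pvGoAChars_eq_fold dfa alphabet f node row hd] at hx
      have hch : ∀ t ∈ alphabet.filterMap (fun c => (PySem.Dict.mk row).get? c), t ∈ C := by
        intro t ht
        exact hclosed node hC hn0 t (by simp [pvChildren, hd, ht])
      have hns' : ∀ y ∈ PySem.Set.add ns node, y ∈ nodes0 ∨ y ∈ C := by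
        intro y hy
        rcases (PySem.Set.mem_add ns node y).mp hy with h | rfl
        · exact hns y h
        · exact Or.inr hC
      exact pv_fold_ok dfa alphabet nodes0 C f (ih) _ _ hch
        (fun y hy => pv_subset_add ns node (hsub hy)) hns' x hx

-- ===== fuel irrelevance =====

theorem pv_foldl_irrel (dfa : List (String × List (String × String))) (alphabet nodes0 C : List String)
    (hclosed : ∀ a ∈ C, a ∉ nodes0 → ∀ t ∈ pvChildren dfa alphabet a, t ∈ C)
    (hkeys : ∀ a ∈ C, a ∉ nodes0 → a ∈ pvKeys dfa) (k : Nat)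
    (IH : ∀ j, j < k → ∀ (ns : List String) (node : String) (f f' : Nat),
      pvMu dfa ns ≤ j → nodes0 ⊆ ns → (∀ x ∈ ns, x ∈ nodes0 ∨ x ∈ C) → node ∈ C →
      j + 2 ≤ f → j + 2 ≤ f' → pvGoA dfa alphabet f node ns = pvGoA dfa alphabet f' node ns) :
    ∀ (L s : List String) (f f' : Nat),
      pvMu dfa s < k → nodes0 ⊆ s → (∀ x ∈ s, x ∈ nodes0 ∨ x ∈ C) → (∀ t ∈ L, t ∈ C) →
      k + 1 ≤ f → k + 1 ≤ f' →
      L.foldl (fun s t => pvGoA dfa alphabet f t s) s = L.foldl (fun s t => pvGoA dfa alphabet f' t s) s := by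
  intro L
  induction L with
  | nil => intro s f f' _ _ _ _ _ _; rfl
  | cons t L ihL =>
    intro s f f' hmu hsub hs hL hf hf'
    have h1 : pvGoA dfa alphabet f t s = pvGoA dfa alphabet f' t s :=
      IH (pvMu dfa s) hmu s t f f' le_rfl hsub hs (hL t (by simp)) (by omega) (by omega)
    rw [List.foldl_cons, List.foldl_cons, h1]
    have hsup : s ⊆ pvGoA dfa alphabet f' t s := pvGoA_subset dfa alphabet f' t s
    have hs' : ∀ x ∈ pvGoA dfa alphabet f' t s, x ∈ nodes0 ∨ x ∈ C :=
      pvGoA_ok dfa alphabet nodes0 C hclosed hkeys f' t s (hL t (by simp)) hsub hs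
    exact ihL _ f f' (lt_of_le_of_lt (pvMu_mono hsup) hmu) (fun y hy => hsup (hsub hy)) hs'
      (fun u hu => hL u (by simp [hu])) hf hf'

theorem pvGoA_irrel (dfa : List (String × List (String × String))) (alphabet nodes0 C : List String)
    (hclosed : ∀ a ∈ C, a ∉ nodes0 → ∀ t ∈ pvChildren dfa alphabet a, t ∈ C)
    (hkeys : ∀ a ∈ C, a ∉ nodes0 → a ∈ pvKeys dfa) :
    ∀ (k : Nat) (ns : List String) (node : String) (f f' : Nat),
      pvMu dfa ns ≤ k → nodes0 ⊆ ns → (∀ x ∈ ns, x ∈ nodes0 ∨ x ∈ C) → node ∈ C →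
      k + 2 ≤ f → k + 2 ≤ f' →
      pvGoA dfa alphabet f node ns = pvGoA dfa alphabet f' node ns := by
  intro k
  induction k using Nat.strong_induction_on with
  | _ k IH =>
    intro ns node f f' hmu hsub hns hC hf hf'
    obtain ⟨a, rfl⟩ : ∃ a, f = a + 1 := ⟨f - 1, by omega⟩
    obtain ⟨b, rfl⟩ : ∃ b, f' = b + 1 := ⟨f' - 1, by omega⟩
    rw [pvGoA_succ, pvGoA_succ]
    by_cases hn : node ∈ ns
    · simp [hn]
    · rw [if_neg hn, if_neg hn]
      have hn0 : node ∉ nodes0 := fun h => hn (hsub h)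
      have hkey : node ∈ pvKeys dfa := hkeys node hC hn0
      obtain ⟨row, hd⟩ := pv_get?_of_key hkey
      rw [pvGoAChars_eq_fold dfa alphabet a node row hd, pvGoAChars_eq_fold dfa alphabet b node row hd]
      have hmu1 : pvMu dfa (PySem.Set.add ns node) < k :=
        lt_of_lt_of_le (pvMu_add_lt hkey hn) hmu
      have hns' : ∀ y ∈ PySem.Set.add ns node, y ∈ nodes0 ∨ y ∈ C := by
        intro y hy
        rcases (PySem.Set.mem_add ns node y).mp hy with h | rfl
        · exact hns y h
        · exact Or.inr hC
      have hch : ∀ t ∈ alphabet.filterMap (fun c => (PySem.Dict.mk row).get? c), t ∈ C := by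
        intro t ht
        exact hclosed node hC hn0 t (by simp [pvChildren, hd, ht])
      exact pv_foldl_irrel dfa alphabet nodes0 C hclosed hkeys k IH _ _ a b hmu1
        (fun y hy => pv_subset_add ns node (hsub hy)) hns' hch (by omega) (by omega)

-- ===== the bridge: B's stack loop computes the fold of A's DFS over the stack =====

theorem pvGoB_bridge (dfa : List (String × List (String × String))) (alphabet nodes0 C : List String)
    (hclosed : ∀ a ∈ C, a ∉ nodes0 → ∀ t ∈ pvChildren dfa alphabet a, t ∈ C)
    (hkeys : ∀ a ∈ C, a ∉ nodes0 → a ∈ pvKeys dfa) :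
    ∀ (fB : Nat) (ns stack : List String),
      nodes0 ⊆ ns → (∀ x ∈ ns, x ∈ nodes0 ∨ x ∈ C) → (∀ n ∈ stack, n ∈ C) →
      pvMu dfa ns * (alphabet.length + 1) + stack.length ≤ fB →
      pvGoB dfa alphabet fB stack ns =
        stack.foldl (fun s n => pvGoA dfa alphabet (dfa.length + 2) n s) ns := by
  intro fB
  induction fB using Nat.strong_induction_on with
  | _ fB IH =>
    intro ns stack hsub hns hstk hfuel
    cases stack with
    | nil => rw [pvGoB_nil]; rfl
    | cons n rest =>
      obtain ⟨f, rfl⟩ : ∃ f, fB = f + 1 := ⟨fB - 1, by simp at hfuel; omega⟩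
      rw [pvGoB_succ_cons, List.foldl_cons]
      by_cases hn : n ∈ ns
      · rw [if_pos hn]
        have hA : pvGoA dfa alphabet (dfa.length + 2) n ns = ns := by
          rw [show dfa.length + 2 = dfa.length + 1 + 1 from rfl, pvGoA_succ, if_pos hn]
        rw [hA]
        exact IH f (by omega) ns rest hsub hns (fun m hm => hstk m (by simp [hm]))
          (by simp at hfuel ⊢; omega)
      · rw [if_neg hn]
        have hC : n ∈ C := hstk n (by simp)
        have hn0 : n ∉ nodes0 := fun h => hn (hsub h)
        have hkey : n ∈ pvKeys dfa := hkeys n hC hn0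
        obtain ⟨row, hd⟩ := pv_get?_of_key hkey
        rw [hd]
        dsimp only
        rw [pv_push_eq]
        have hns' : ∀ y ∈ PySem.Set.add ns n, y ∈ nodes0 ∨ y ∈ C := by
          intro y hy
          rcases (PySem.Set.mem_add ns n y).mp hy with h | rfl
          · exact hns y h
          · exact Or.inr hC
        have hch : ∀ t ∈ alphabet.filterMap (fun c => (PySem.Dict.mk row).get? c), t ∈ C := by
          intro t ht
          exact hclosed n hC hn0 t (by simp [pvChildren, hd, ht])
        have hmu1 : pvMu dfa (PySem.Set.add ns n) < pvMu dfa ns := pvMu_add_lt hkey hn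
        have hmuk : pvMu dfa ns ≤ dfa.length := pvMu_le_len dfa ns
        have hClen : (alphabet.filterMap (fun c => (PySem.Dict.mk row).get? c)).length ≤ alphabet.length :=
          List.length_filterMap_le _ _
        have harith : pvMu dfa (PySem.Set.add ns n) * (alphabet.length + 1) +
            (alphabet.filterMap (fun c => (PySem.Dict.mk row).get? c) ++ rest).length ≤ f := by
          have h3 : (pvMu dfa (PySem.Set.add ns n) + 1) * (alphabet.length + 1) ≤
              pvMu dfa ns * (alphabet.length + 1) := Nat.mul_le_mul_right _ hmu1
          rw [Nat.succ_mul] at h3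
          simp only [List.length_append, List.length_cons] at hfuel ⊢
          generalize pvMu dfa (PySem.Set.add ns n) * (alphabet.length + 1) = X at h3 ⊢
          generalize pvMu dfa ns * (alphabet.length + 1) = Y at h3 hfuel
          omega
        rw [IH f (by omega) (PySem.Set.add ns n) _ (fun y hy => pv_subset_add ns n (hsub hy)) hns'
          (by
            intro m hm
            rcases List.mem_append.mp hm with hm | hm
            · exact hch m hm
            · exact hstk m (by simp [hm]))
          harith]
        rw [List.foldl_append]
        have hseed : pvGoA dfa alphabet (dfa.length + 2) n ns =
            (alphabet.filterMap (fun c => (PySem.Dict.mk row).get? c)).foldl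
              (fun s t => pvGoA dfa alphabet (dfa.length + 2) t s) (PySem.Set.add ns n) := by
          rw [show dfa.length + 2 = dfa.length + 1 + 1 from rfl, pvGoA_succ, if_neg hn,
            pvGoAChars_eq_fold dfa alphabet (dfa.length + 1) n row hd]
          exact pv_foldl_irrel dfa alphabet nodes0 C hclosed hkeys dfa.length
            (fun j hj => pvGoA_irrel dfa alphabet nodes0 C hclosed hkeys j)
            _ _ (dfa.length + 1) (dfa.length + 1 + 1)
            (lt_of_lt_of_le hmu1 hmuk) (fun y hy => pv_subset_add ns n (hsub hy)) hns' hch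
            (by omega) (by omega)
        rw [hseed]

-- ===== VERDICT (by name: the statement is the Claim_ definition above) =====
theorem reachable_from_spec : Claim_equal_reachable_from := by
  intro node dfa nodes alphabet _hDom hPre
  unfold Spec_reachable_from reachable_from reachable_from_alt
  by_cases hn : node ∈ nodes
  · rw [if_pos hn, show dfa.length + 2 = dfa.length + 1 + 1 from rfl, pvGoA_succ, if_pos hn]
  · rw [if_neg hn]
    rcases hPre with h | h | hclos
    · exact absurd h hn
    · -- empty alphabet: both return nodes ∪ {node}
      subst h
      rw [show dfa.length + 2 = dfa.length + 1 + 1 from rfl, pvGoA_succ, if_neg hn]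
      simp only [pvGoAChars]
      rw [show dfa.length * (List.length ([] : List String) + 1) + 2 = dfa.length * 1 + 1 + 1 from by simp,
        pvGoB_succ_cons, if_neg hn]
      cases hd : (PySem.Dict.mk dfa).get? node with
      | none => rw [pvGoB_nil]
      | some row =>
        dsimp only
        rw [show (List.reverse ([] : List String)) = [] from rfl]
        rw [show (List.foldl _ ([] : List String) ([] : List String)) = [] from rfl]
        rw [pvGoB_nil]
    · -- general case: the reachable set pvClosure is the invariant
      have hkeys : ∀ a ∈ pvClosure node dfa nodes alphabet, a ∉ nodes → a ∈ pvKeys dfa := by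
        intro a ha hnn
        rcases hclos a ha with h | h
        · exact absurd h hnn
        · exact h
      have hclosed : ∀ a ∈ pvClosure node dfa nodes alphabet, a ∉ nodes →
          ∀ t ∈ pvChildren dfa alphabet a, t ∈ pvClosure node dfa nodes alphabet :=
        fun a ha hnn => pv_closure_children ha hnn
      rw [pvGoB_bridge dfa alphabet nodes (pvClosure node dfa nodes alphabet) hclosed hkeys _ nodes [node]
        (fun y hy => hy) (fun x hx => Or.inl hx)
        (fun m hm => by rw [List.mem_singleton] at hm; rw [hm]; exact pv_closure_self node dfa nodes alphabet)
        (by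
          have h3 : pvMu dfa nodes * (alphabet.length + 1) ≤ dfa.length * (alphabet.length + 1) :=
            Nat.mul_le_mul_right _ (pvMu_le_len dfa nodes)
          simp only [List.length_singleton]
          generalize pvMu dfa nodes * (alphabet.length + 1) = X at h3 ⊢
          generalize dfa.length * (alphabet.length + 1) = Y at h3 ⊢
          omega)]
      rfl
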